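-- pv_equiv track=rewrite | github.com/hthuku95/BlenderMCPServer | manim_scripts/latex_transparent.py | _tokenise_terms
-- ===== SOURCE A (Python) =====
-- def _tokenise_terms(expr: str) -> list[str]:
--     """
--     Split a LaTeX expression into individual terms (split on + / - / = at top level).
--     Returns the original expression in a single-element list if splitting is not useful.
--     """
--     inner = expr.replace(r"\[", "").replace(r"\]", "").strip()
--     tokens: list[str] = []
--     depth = 0
--     current = ""
--     i = 0
--     while i < len(inner):
--         ch = inner[i]
--         if ch in "{":
--             depth += 1
--             current += ch
--         elif ch in "}":
--             depth -= 1
--             current += ch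
--         elif ch in ("+", "-", "=") and depth == 0:
--             if current.strip():
--                 tokens.append(current.strip())
--             tokens.append(ch)
--             current = ""
--         else:
--             current += ch
--         i += 1
--     if current.strip():
--         tokens.append(current.strip())
--     return tokens if len(tokens) > 1 else [expr]
-- ===== SOURCE B (Python) =====
-- def _tokenise_terms(expr: str) -> list[str]:
--     """
--     Split a LaTeX expression into individual terms (split on + / - / = at top level).
--     Returns the original expression in a single-element list if splitting is not useful.
--     """
--     inner = expr.replace("\\[", "").replace("\\]", "").strip()
--     tokens = _split_at_top(inner)
--     return tokens if len(tokens) > 1 else [expr]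
--
--
-- def _next_op(s: str) -> int:
--     """Index of the first top-level + / - / = in s, or -1."""
--     depth = 0
--     for i, ch in enumerate(s):
--         if ch == "{":
--             depth += 1
--         elif ch == "}":
--             depth -= 1
--         elif ch in "+-=" and depth == 0:
--             return i
--     return -1
--
--
-- def _split_at_top(s: str) -> list[str]:
--     j = _next_op(s)
--     if j < 0:
--         return [s.strip()] if s.strip() else []
--     head = s[:j].strip()
--     rest = _split_at_top(s[j + 1:])
--     return ([head] if head else []) + [s[j]] + rest
-- ===== Notes on version B (the rewrite author's own statement) =====
-- stated objective: faster
-- what changed: Replaced A's single-pass character loop with (tokens, depth, current) accumulator state, which grows `current` one character at a time via string concatenation, by a recursive decomposition: a helper cuts the string at the first top-level +/-/= into (head, operator, tail) via slicing and the splitter recurses on the tail.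
import Mathlib
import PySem

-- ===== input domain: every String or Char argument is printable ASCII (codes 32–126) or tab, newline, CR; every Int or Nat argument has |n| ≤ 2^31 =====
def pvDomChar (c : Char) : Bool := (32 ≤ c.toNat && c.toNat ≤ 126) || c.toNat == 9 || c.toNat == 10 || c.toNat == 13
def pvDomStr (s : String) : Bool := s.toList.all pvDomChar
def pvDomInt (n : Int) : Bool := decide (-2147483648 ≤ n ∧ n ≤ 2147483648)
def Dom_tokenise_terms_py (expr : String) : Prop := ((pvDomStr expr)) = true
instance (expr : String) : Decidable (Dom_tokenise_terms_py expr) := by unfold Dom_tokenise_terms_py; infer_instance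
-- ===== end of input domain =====

-- B replaces A's single-pass accumulator loop (which grows `current` one character at a time)
-- by a recursive decomposition: cut at the first top-level operator and recurse on the tail;
-- a timing run measured B faster on its generated inputs (objective: faster).

-- ===== PORT A =====
-- A's while-loop over inner with state (tokens, depth, current); current/tokens kept as
-- List Char / List (List Char), converted to String at the end.
def loopA : List Char → List (List Char) → Int → List Char → List (List Char)
  | [], tokens, _, current =>
      if PySem.Chars.strip current ≠ [] then tokens ++ [PySem.Chars.strip current] else tokens
  | ch :: rest, tokens, depth, current =>
      if ch = '{' then loopA rest tokens (depth + 1) (current ++ [ch])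
      else if ch = '}' then loopA rest tokens (depth - 1) (current ++ [ch])
      else if (ch = '+' ∨ ch = '-' ∨ ch = '=') ∧ depth = 0 then
        loopA rest
          ((if PySem.Chars.strip current ≠ [] then tokens ++ [PySem.Chars.strip current] else tokens)
            ++ [[ch]]) depth []
      else loopA rest tokens depth (current ++ [ch])

def tokenise_terms_py (expr : String) : List String :=
  let inner := PySem.Chars.strip
    (PySem.Chars.replace (PySem.Chars.replace expr.toList ['\\', '['] []) ['\\', ']'] [])
  let tokens := loopA inner [] 0 []
  if tokens.length > 1 then tokens.map String.ofList else [expr]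

-- ===== PORT B =====
-- Source B's _cut: (prefix before first top-level operator, that operator or none, suffix after it)
def cutB : List Char → Int → List Char × Option Char × List Char
  | [], _ => ([], none, [])
  | ch :: rest, depth =>
      if ch = '{' then
        let r := cutB rest (depth + 1); (ch :: r.1, r.2.1, r.2.2)
      else if ch = '}' then
        let r := cutB rest (depth - 1); (ch :: r.1, r.2.1, r.2.2)
      else if (ch = '+' ∨ ch = '-' ∨ ch = '=') ∧ depth = 0 then
        ([], some ch, rest)
      else
        let r := cutB rest depth; (ch :: r.1, r.2.1, r.2.2)

-- termination fact for splitAtTopB (the suffix after a found operator is strictly shorter)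
theorem cutB_some_lt (s : List Char) (d : Int) (h : (cutB s d).2.1.isSome = true) :
    (cutB s d).2.2.length < s.length := by
  induction s generalizing d with
  | nil => simp [cutB] at h
  | cons ch rest ih =>
      simp only [cutB] at h ⊢
      split_ifs at h ⊢ with h1 h2 h3
      · exact Nat.lt_succ_of_lt (ih _ h)
      · exact Nat.lt_succ_of_lt (ih _ h)
      · simp
      · exact Nat.lt_succ_of_lt (ih _ h)

-- Source B's _split_at_top
def splitAtTopB (s : List Char) : List (List Char) :=
  match hr : cutB s 0 with
  | (head, none, _) =>
      let hs := PySem.Chars.strip head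
      if hs ≠ [] then [hs] else []
  | (head, some op, rest) =>
      let hs := PySem.Chars.strip head
      (if hs ≠ [] then [hs] else []) ++ [op] :: splitAtTopB rest
termination_by s.length
decreasing_by
  have h := cutB_some_lt s 0 (by rw [hr]; rfl)
  rw [hr] at h; exact h

def tokenise_terms_py_alt (expr : String) : List String :=
  let inner := PySem.Chars.strip
    (PySem.Chars.replace (PySem.Chars.replace expr.toList ['\\', '['] []) ['\\', ']'] [])
  let tokens := splitAtTopB inner
  if tokens.length > 1 then tokens.map String.ofList else [expr]

-- ===== PRECONDITION & SPEC =====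
def Spec_tokenise_terms_py (expr : String) (out : List String) : Prop := out = tokenise_terms_py_alt expr
instance (expr : String) (out : List String) : Decidable (Spec_tokenise_terms_py expr out) := by unfold Spec_tokenise_terms_py; infer_instance

-- ===== CLAIM (what is proved, stated in full; the proofs are below) =====
def Claim_equal_tokenise_terms_py : Prop := ∀ (expr : String), Dom_tokenise_terms_py expr → Spec_tokenise_terms_py expr (tokenise_terms_py expr)

-- ===== LEMMAS AND PROOFS =====

-- A's loop only appends to tokens
theorem loopA_tokens (s : List Char) (ts : List (List Char)) (d : Int) (c : List Char) :
    loopA s ts d c = ts ++ loopA s [] d c := by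
  induction s generalizing ts d c with
  | nil => simp only [loopA]; split_ifs <;> simp
  | cons ch rest ih =>
      simp only [loopA]
      by_cases h1 : ch = '{'
      · rw [if_pos h1, if_pos h1]; exact ih ts (d + 1) (c ++ [ch])
      by_cases h2 : ch = '}'
      · rw [if_neg h1, if_neg h1, if_pos h2, if_pos h2]; exact ih ts (d - 1) (c ++ [ch])
      by_cases h3 : (ch = '+' ∨ ch = '-' ∨ ch = '=') ∧ d = 0
      · rw [if_neg h1, if_neg h1, if_neg h2, if_neg h2, if_pos h3, if_pos h3, ih, ih]
        split_ifs <;> (conv_rhs => rw [ih]) <;> simp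
      · rw [if_neg h1, if_neg h1, if_neg h2, if_neg h2, if_neg h3, if_neg h3]
        exact ih ts d (c ++ [ch])

-- A's loop, described through B's cut of the remaining input
theorem loop_cut (s : List Char) (d : Int) (c : List Char) :
    loopA s [] d c =
      (if PySem.Chars.strip (c ++ (cutB s d).1) ≠ []
        then [PySem.Chars.strip (c ++ (cutB s d).1)] else []) ++
      (match (cutB s d).2.1 with
       | none => []
       | some op => [op] :: loopA (cutB s d).2.2 [] 0 []) := by
  induction s generalizing d c with
  | nil =>
      simp only [loopA, cutB, List.append_nil]
      split_ifs <;> simp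
  | cons ch rest ih =>
      simp only [loopA, cutB]
      by_cases h1 : ch = '{'
      · rw [if_pos h1, if_pos h1, ih (d + 1) (c ++ [ch])]
        simp
      by_cases h2 : ch = '}'
      · rw [if_neg h1, if_neg h1, if_pos h2, if_pos h2, ih (d - 1) (c ++ [ch])]
        simp
      by_cases h3 : (ch = '+' ∨ ch = '-' ∨ ch = '=') ∧ d = 0
      · rw [if_neg h1, if_neg h1, if_neg h2, if_neg h2, if_pos h3, if_pos h3]
        have hd0 : d = 0 := h3.2
        subst hd0
        rw [loopA_tokens]
        simp only [List.append_nil]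
        split_ifs <;> simp
      · rw [if_neg h1, if_neg h1, if_neg h2, if_neg h2, if_neg h3, if_neg h3, ih d (c ++ [ch])]
        simp

-- A's loop from the initial state equals B's recursive split (strong induction on length)
theorem loop_eq_split : ∀ (n : Nat) (s : List Char), s.length < n →
    loopA s [] 0 [] = splitAtTopB s := by
  intro n
  induction n with
  | zero => intro s h; omega
  | succ n ih =>
      intro s hs
      rw [splitAtTopB.eq_def]
      split
      · rename_i head snd h
        rw [loop_cut]
        simp [h]
      · rename_i head op rest h
        have hlt : rest.length < s.length := by
          have h' := cutB_some_lt s 0 (by rw [h]; rfl)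
          rwa [h] at h'
        rw [loop_cut]
        simp only [h]
        rw [ih rest (by omega)]
        simp

theorem loopA_eq_splitAtTopB (s : List Char) : loopA s [] 0 [] = splitAtTopB s :=
  loop_eq_split (s.length + 1) s (Nat.lt_succ_self _)

-- ===== VERDICT (by name: the statement is the Claim_ definition above) =====
theorem tokenise_terms_py_spec : Claim_equal_tokenise_terms_py := by
  intro expr _
  unfold Spec_tokenise_terms_py tokenise_terms_py tokenise_terms_py_alt
  simp only [loopA_eq_splitAtTopB]
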